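-- pv_equiv track=rewrite | github.com/leopoldch/ai_dodo_game | gopher.py | is_legit
-- ===== SOURCE A (Python) =====
-- import math
--
-- Cell = tuple[int, int]
--
-- Player = int # 1 ou 2
--
-- State = list[tuple[Cell, Player]] # État du jeu pour la boucle de jeu
--
-- Grid = dict[Cell:Player]
--
-- def state_to_grid(state:State) ->Grid:
--     grid : Grid ={} # stocke l'état de la grille
--     for item in state:
--         grid[item[0]]=item[1]
--     return grid
--
-- def size(state:State) -> int:
--     """get size of grid"""
--     grid : Grid = state_to_grid(state)
--     size1 : int = 0
--     size2 : int = -1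
--     verif1 : bool = True
--     verif2 : bool = True
--     while verif1:
--         try:
--             _=grid[(0,size1)]
--             size1+=1
--         except:
--             verif1 = False
--     while verif2:
--         try:
--             _=grid[(0,size2)]
--             size2-=1
--         except:
--             verif2 = False
--     return size1+abs(size2)-1
--
-- def get_neighbors(state : State,x: int, y: int) -> list[Cell]:
--         """returns coordonates of neighbors"""
--
--         grid = state_to_grid(state)
--
--         max : int = math.floor(size(state)/2)
--
--         if  x > max or x < -max or y > max or y< -max :
--             raise ValueError("Case non dans le tableau")
--
--         neighbors: list[Cell] = []
--         closes: tuple[int, int, int] = (-1, 0, 1)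
--
--         for value_x in closes:
--             for value_y in closes:
--                 vx: int = x + value_x
--                 vy: int = y + value_y
--                 if (
--                     -max <= vx <= max
--                     and -max <= vy <= max
--                     and (vx, vy) != (x, y)
--                     and (value_x,value_y) != (1,-1)
--                     and (value_x,value_y) != (-1,1)
--                 ):
--                     key : Cell = (vx,vy)
--                     if key in grid.keys():
--                         stored_value = grid[key]
--                         if stored_value != -1 and key not in neighbors:
--                             neighbors.append(key)
--         return neighbors
--
-- def is_legit(state:State,start: Cell, player : Player) -> bool:
--         """returns if move is legit or not"""
--         grid = state_to_grid(state)
--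
--         # si la case est déjà occupée on retourne faux
--         if grid[start] != 0:
--             return False
--
--         # attention si la grille est vide alors le premier coup est valide
--         # pour réduire la compléxité on peut ajouter un attribut de classe premier coup
--
--         if not 1 in grid.values() and not 2 in grid.values():
--             return True
--
--         neighbors: list[Cell] = get_neighbors(state,start[0], start[1])
--         verif : int = 0
--
--         for item in neighbors:
--             if grid[(item[0],item[1])] == player:  # vérification s'il y a un piont du joueur adjascent
--                 return False
--             # vérification s'il y a exactement un seul piont ennemy adjascent
--             if player == 1:
--                 if grid[(item[0], item[1])] == 2:
--                     verif += 1
--             elif player == 2 :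
--                 if grid[(item[0], item[1])] == 1:
--                     verif += 1
--         if verif == 1:
--             return True
--         return False
-- ===== SOURCE B (Python) =====
-- # Single-pass rewrite: build the occupancy dict once, then scan its items and
-- # classify each stone by its offset from `start` against a table of the six
-- # legal hex directions -- no candidate list of neighbor cells is ever built.
--
-- _DIRS = {(-1, -1), (-1, 0), (0, -1), (0, 1), (1, 0), (1, 1)}
--
--
-- def _half_size(occ):
--     """half of the board size, measured by probing column x == 0."""
--     up = 0
--     while (0, up) in occ:
--         up += 1
--     down = 0
--     while (0, -1 - down) in occ:
--         down += 1
--     return (up + down) // 2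
--
--
-- def is_legit(state, start, player):
--     occ = {}
--     for cell, val in state:
--         occ[cell] = val
--
--     if occ[start] != 0:          # occupied cell: never legal (KeyError if absent)
--         return False
--
--     if all(v not in (1, 2) for v in occ.values()):
--         return True              # empty board: first move is always legal
--
--     mx = _half_size(occ)
--     if start[0] > mx or start[0] < -mx or start[1] > mx or start[1] < -mx:
--         raise ValueError("Case non dans le tableau")
--
--     enemy = 2 if player == 1 else (1 if player == 2 else None)
--     enemies = 0
--     for (cx, cy), val in occ.items():
--         if val == -1:
--             continue
--         if (cx - start[0], cy - start[1]) not in _DIRS: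
--             continue
--         if cx > mx or cx < -mx or cy > mx or cy < -mx:
--             continue
--         if val == player:
--             return False
--         if val == enemy:
--             enemies += 1
--     return enemies == 1
-- ===== Notes on version B (the rewrite author's own statement) =====
-- stated objective: alternative
-- what changed: A generates the 9 candidate neighbour offsets in nested loops, builds a deduplicated neighbour-cell list via grid lookups and then runs a second counting loop over it; B never builds a neighbour list: it makes one pass over the occupancy dict's items, classifying each stone by its offset from start against a table of the six legal hex directions, failing fast on an own adjacent stone and counting enemy stones.
import Mathlib
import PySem

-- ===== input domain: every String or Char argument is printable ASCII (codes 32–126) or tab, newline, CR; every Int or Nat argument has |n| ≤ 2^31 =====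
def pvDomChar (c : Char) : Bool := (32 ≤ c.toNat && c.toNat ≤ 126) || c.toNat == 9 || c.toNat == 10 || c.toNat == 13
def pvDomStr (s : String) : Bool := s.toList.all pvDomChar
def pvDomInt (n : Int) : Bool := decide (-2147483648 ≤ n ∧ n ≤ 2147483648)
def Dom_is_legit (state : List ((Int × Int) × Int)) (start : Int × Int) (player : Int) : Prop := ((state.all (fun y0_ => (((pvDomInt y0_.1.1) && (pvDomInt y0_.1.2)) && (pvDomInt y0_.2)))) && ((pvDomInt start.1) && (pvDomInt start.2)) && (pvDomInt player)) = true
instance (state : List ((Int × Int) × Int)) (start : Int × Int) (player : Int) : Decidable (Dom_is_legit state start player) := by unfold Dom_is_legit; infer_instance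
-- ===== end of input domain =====

-- B replaces A's candidate-generation (nested loops over the 9 offsets, building a
-- deduplicated neighbour list, then a second counting loop) by a single pass over the
-- occupancy dict's items, classifying each stone by its offset against a table of the
-- six legal hex directions.  Equivalence is about the RETURN value; neither mutates input.

-- ===== PORT A =====

def state_to_grid (state : List ((Int × Int) × Int)) : PySem.Dict (Int × Int) Int :=
  state.foldl (fun d item => d.insert item.1 item.2) PySem.Dict.empty

-- the two probing `while` loops of size(); fuel = state.length + 1 always suffices,
-- since a run of distinct present keys cannot be longer than the list building the dict
def probeUpA (g : PySem.Dict (Int × Int) Int) : Int → Nat → Int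
  | y, 0 => y
  | y, f + 1 => if g.contains ((0 : Int), y) then probeUpA g (y + 1) f else y

def probeDownA (g : PySem.Dict (Int × Int) Int) : Int → Nat → Int
  | y, 0 => y
  | y, f + 1 => if g.contains ((0 : Int), y) then probeDownA g (y - 1) f else y

def sizeA (state : List ((Int × Int) × Int)) : Int :=
  let g := state_to_grid state
  let size1 := probeUpA g 0 (state.length + 1)
  let size2 := probeDownA g (-1) (state.length + 1)
  size1 + |size2| - 1

def closesA : List Int := [-1, 0, 1]

-- get_neighbors; `none` = the ValueError (start outside the board).
-- math.floor(size/2) on a nonnegative int is exactly floor division by 2.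
def get_neighborsA (state : List ((Int × Int) × Int)) (x y : Int) : Option (List (Int × Int)) :=
  let g := state_to_grid state
  let mx := PySem.Int.floordiv (sizeA state) 2
  if x > mx ∨ x < -mx ∨ y > mx ∨ y < -mx then none
  else
    some <| closesA.foldl (fun acc vx => closesA.foldl (fun acc vy =>
      let vnx := x + vx
      let vny := y + vy
      if (-mx ≤ vnx ∧ vnx ≤ mx) ∧ (-mx ≤ vny ∧ vny ≤ mx) ∧ (vnx, vny) ≠ (x, y) ∧
          (vx, vy) ≠ ((1 : Int), (-1 : Int)) ∧ (vx, vy) ≠ ((-1 : Int), (1 : Int)) then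
        if g.contains (vnx, vny) then
          -- key present, so grid[key] = getD … 0 (no KeyError possible here)
          if g.getD (vnx, vny) 0 ≠ -1 ∧ (vnx, vny) ∉ acc then acc ++ [(vnx, vny)] else acc
        else acc
      else acc) acc) ([] : List (Int × Int))

-- the final for-loop of is_legit: early return False on an own stone, else count enemies
def loopA (g : PySem.Dict (Int × Int) Int) (player : Int) : List (Int × Int) → Int → Bool
  | [], verif => verif == 1
  | c :: rest, verif =>
    if g.getD c 0 == player then false
    else loopA g player rest (verif +
      (if player == 1 then (if g.getD c 0 == 2 then 1 else 0)
       else if player == 2 then (if g.getD c 0 == 1 then 1 else 0) else 0))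

def is_legit (state : List ((Int × Int) × Int)) (start : Int × Int) (player : Int) : Bool :=
  let g := state_to_grid state
  match g.get? start with
  | none => false          -- KeyError in Python; excluded by Pre_
  | some sv =>
    if sv ≠ 0 then false
    else if ¬ (1 ∈ g.values) ∧ ¬ (2 ∈ g.values) then true
    else
      match get_neighborsA state start.1 start.2 with
      | none => false      -- ValueError in Python; excluded by Pre_
      | some neighbors => loopA g player neighbors 0

-- ===== PORT B =====

def occB (state : List ((Int × Int) × Int)) : PySem.Dict (Int × Int) Int :=
  state.foldl (fun d p => d.insert p.1 p.2) PySem.Dict.empty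

def upB (g : PySem.Dict (Int × Int) Int) : Nat → Nat → Nat
  | n, 0 => n
  | n, f + 1 => if g.contains ((0 : Int), (n : Int)) then upB g (n + 1) f else n

def downB (g : PySem.Dict (Int × Int) Int) : Nat → Nat → Nat
  | n, 0 => n
  | n, f + 1 => if g.contains ((0 : Int), -1 - (n : Int)) then downB g (n + 1) f else n

def half_sizeB (g : PySem.Dict (Int × Int) Int) (fuel : Nat) : Int :=
  (((upB g 0 fuel + downB g 0 fuel) / 2 : Nat) : Int)

def dirsB : List (Int × Int) := [(-1, -1), (-1, 0), (0, -1), (0, 1), (1, 0), (1, 1)]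

def loopB (mx sx sy player : Int) (enemy : Option Int) :
    List ((Int × Int) × Int) → Nat → Bool
  | [], n => n == 1
  | (c, v) :: rest, n =>
    if v == -1 then loopB mx sx sy player enemy rest n
    else if ¬ ((c.1 - sx, c.2 - sy) ∈ dirsB) then loopB mx sx sy player enemy rest n
    else if c.1 > mx ∨ c.1 < -mx ∨ c.2 > mx ∨ c.2 < -mx then loopB mx sx sy player enemy rest n
    else if v == player then false
    else if some v == enemy then loopB mx sx sy player enemy rest (n + 1)
    else loopB mx sx sy player enemy rest n

def is_legit_alt (state : List ((Int × Int) × Int)) (start : Int × Int) (player : Int) : Bool :=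
  let occ := occB state
  match occ.get? start with
  | none => false          -- KeyError in Python; excluded by Pre_
  | some sv =>
    if sv ≠ 0 then false
    else if occ.values.all (fun v => !(v == 1 || v == 2)) then true
    else
      let mx := half_sizeB occ (state.length + 1)
      if start.1 > mx ∨ start.1 < -mx ∨ start.2 > mx ∨ start.2 < -mx then false  -- ValueError; excluded by Pre_
      else
        loopB mx start.1 start.2 player
          (if player == 1 then some 2 else if player == 2 then some 1 else none)
          occ.items 0

-- ===== PRECONDITION & SPEC =====

-- board radius: half of (run of consecutive cells (0,0),(0,1),… present in the grid
-- plus run of (0,-1),(0,-2),… present) — the shape of column 0 of the input grid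
def preRadius (state : List ((Int × Int) × Int)) : Int :=
  ((((List.range (state.length + 1)).takeWhile
        (fun (n : Nat) => (state_to_grid state).contains ((0 : Int), (n : Int)))).length
    + ((List.range (state.length + 1)).takeWhile
        (fun (n : Nat) => (state_to_grid state).contains ((0 : Int), -1 - (n : Int)))).length) / 2 : Nat)

-- Pre_ excludes exactly the inputs where the Python A raises: KeyError when start is not
-- a key of the grid, and ValueError when the cell is empty, the board is non-empty, and
-- start lies outside the board radius (a shape property of column 0 of the input grid).
def Pre_is_legit (state : List ((Int × Int) × Int)) (start : Int × Int) (player : Int) : Prop :=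
  let g := state_to_grid state
  let mx := preRadius state
  g.contains start = true ∧
    (g.getD start 0 = 0 → (1 ∈ g.values ∨ 2 ∈ g.values) →
      (-mx ≤ start.1 ∧ start.1 ≤ mx ∧ -mx ≤ start.2 ∧ start.2 ≤ mx))

instance (state : List ((Int × Int) × Int)) (start : Int × Int) (player : Int) :
    Decidable (Pre_is_legit state start player) := by unfold Pre_is_legit; infer_instance

def pvWitness_is_legit : (List ((Int × Int) × Int)) × (Int × Int) × Int :=
  ([((0, 0), 0), ((0, 1), 2)], (0, 0), 1)

def Spec_is_legit (state : List ((Int × Int) × Int)) (start : Int × Int) (player : Int) (out : Bool) : Prop := out = is_legit_alt state start player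
instance (state : List ((Int × Int) × Int)) (start : Int × Int) (player : Int) (out : Bool) : Decidable (Spec_is_legit state start player out) := by unfold Spec_is_legit; infer_instance

-- ===== CLAIM (what is proved, stated in full; the proofs are below) =====
def Claim_equal_is_legit : Prop := ∀ (state : List ((Int × Int) × Int)) (start : Int × Int) (player : Int), Dom_is_legit state start player → Pre_is_legit state start player → Spec_is_legit state start player (is_legit state start player)

-- ===== LEMMAS AND PROOFS =====


-- cell reached from (sx,sy) by offset δ
def fcell (sx sy : Int) (d : Int × Int) : Int × Int := (sx + d.1, sy + d.2)

-- out of the board [-mx, mx]^2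
abbrev outP (mx : Int) (c : Int × Int) : Prop := c.1 > mx ∨ c.1 < -mx ∨ c.2 > mx ∨ c.2 < -mx

-- a candidate neighbour cell A keeps: on the board, present in the grid, not a -1 marker
abbrev condKeep (g : PySem.Dict (Int × Int) Int) (mx sx sy : Int) (d : Int × Int) : Prop :=
  ¬ outP mx (fcell sx sy d) ∧ g.contains (fcell sx sy d) = true ∧ g.getD (fcell sx sy d) 0 ≠ -1

-- A's full per-offset condition, including the literal offset exclusions and c ≠ start
abbrev condFull (g : PySem.Dict (Int × Int) Int) (mx sx sy : Int) (d : Int × Int) : Prop :=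
  ((-mx ≤ sx + d.1 ∧ sx + d.1 ≤ mx) ∧ (-mx ≤ sy + d.2 ∧ sy + d.2 ≤ mx) ∧
    (sx + d.1, sy + d.2) ≠ (sx, sy) ∧ d ≠ ((1 : Int), (-1 : Int)) ∧ d ≠ ((-1 : Int), (1 : Int))) ∧
  g.contains (sx + d.1, sy + d.2) = true ∧ g.getD (sx + d.1, sy + d.2) 0 ≠ -1

def offs9 : List (Int × Int) :=
  [(-1, -1), (-1, 0), (-1, 1), (0, -1), (0, 0), (0, 1), (1, -1), (1, 0), (1, 1)]

-- ---- dict construction facts ----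

theorem occB_eq (state : List ((Int × Int) × Int)) : occB state = state_to_grid state := rfl

theorem grid_keys_nodup (state : List ((Int × Int) × Int)) : (state_to_grid state).keys.Nodup := by
  exact PySem.Dict.nodup_keys_foldl_insert_key state (·.1) (fun d p => p.2) PySem.Dict.empty PySem.Dict.nodup_keys_empty
-- ---- board size: A's Int probes = B's Nat probes ----

theorem upA_eq (g : PySem.Dict (Int × Int) Int) :
    ∀ (f : Nat) (n : Nat), probeUpA g (n : Int) f = ((upB g n f : Nat) : Int) := by
  intro f
  induction f with
  | zero => intro n; simp [probeUpA, upB]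
  | succ f ih =>
    intro n
    simp only [probeUpA, upB]
    by_cases h : g.contains ((0 : Int), (n : Int)) = true
    · rw [if_pos h, if_pos h, show ((n : Int) + 1) = ((n + 1 : Nat) : Int) by push_cast; ring, ih]
    · rw [if_neg h, if_neg h]
theorem downA_eq (g : PySem.Dict (Int × Int) Int) :
    ∀ (f : Nat) (n : Nat), probeDownA g (-1 - (n : Int)) f = -1 - ((downB g n f : Nat) : Int) := by
  intro f
  induction f with
  | zero => intro n; simp [probeDownA, downB]
  | succ f ih =>
    intro n
    simp only [probeDownA, downB]
    by_cases h : g.contains ((0 : Int), -1 - (n : Int)) = true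
    · rw [if_pos h, if_pos h, show (-1 - (n : Int) - 1) = (-1 - ((n + 1 : Nat) : Int)) by push_cast; ring, ih]
    · rw [if_neg h, if_neg h]
theorem size_eq (state : List ((Int × Int) × Int)) :
    sizeA state = ((upB (state_to_grid state) 0 (state.length + 1)
      + downB (state_to_grid state) 0 (state.length + 1) : Nat) : Int) := by
  have h1 := upA_eq (state_to_grid state) (state.length + 1) 0
  have h2 := downA_eq (state_to_grid state) (state.length + 1) 0
  simp only [Nat.cast_zero] at h1
  simp only [sizeA]
  rw [h1, show (-1 : Int) = -1 - ((0 : Nat) : Int) by simp, h2]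
  rw [abs_of_nonpos (by omega)]
  push_cast
  ring
theorem mx_eq (state : List ((Int × Int) × Int)) :
    PySem.Int.floordiv (sizeA state) 2 = half_sizeB (state_to_grid state) (state.length + 1) := by
  rw [size_eq, half_sizeB]
  exact_mod_cast PySem.Int.floordiv_natCast _ 2
-- ---- the closed-form radius of Pre_ equals the probed one ----

theorem upB_eq_takeWhile (g : PySem.Dict (Int × Int) Int) :
    ∀ (f n : Nat), upB g n f
      = n + ((List.range f).takeWhile (fun k => g.contains ((0 : Int), ((n + k : Nat) : Int)))).length := by
  intro f
  induction f with
  | zero => intro n; simp [upB]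
  | succ f ih =>
    intro n
    rw [List.range_succ_eq_map]
    by_cases h : g.contains ((0 : Int), (n : Int)) = true
    · have h0 : g.contains ((0 : Int), ((n + 0 : Nat) : Int)) = true := by simpa using h
      simp only [upB, h, if_true, List.takeWhile_cons, h0, List.takeWhile_map, List.length_cons,
        List.length_map]
      rw [ih (n + 1)]
      have : ∀ k : Nat, ((fun k => g.contains ((0 : Int), ((n + k : Nat) : Int))) ∘ Nat.succ) k
          = (fun k => g.contains ((0 : Int), ((n + 1 + k : Nat) : Int))) k := by
        intro k
        simp only [Function.comp]
        congr 2
        push_cast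
        ring
      rw [funext this]
      omega
    · have h0 : ¬ g.contains ((0 : Int), ((n + 0 : Nat) : Int)) = true := by simpa using h
      simp only [upB, h, if_false, List.takeWhile_cons, h0]
      simp

theorem downB_eq_takeWhile (g : PySem.Dict (Int × Int) Int) :
    ∀ (f n : Nat), downB g n f
      = n + ((List.range f).takeWhile (fun k => g.contains ((0 : Int), -1 - ((n + k : Nat) : Int)))).length := by
  intro f
  induction f with
  | zero => intro n; simp [downB]
  | succ f ih =>
    intro n
    rw [List.range_succ_eq_map]
    by_cases h : g.contains ((0 : Int), -1 - (n : Int)) = true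
    · have h0 : g.contains ((0 : Int), -1 - ((n + 0 : Nat) : Int)) = true := by simpa using h
      simp only [downB, h, if_true, List.takeWhile_cons, h0, List.takeWhile_map, List.length_cons,
        List.length_map]
      rw [ih (n + 1)]
      have : ∀ k : Nat, ((fun k => g.contains ((0 : Int), -1 - ((n + k : Nat) : Int))) ∘ Nat.succ) k
          = (fun k => g.contains ((0 : Int), -1 - ((n + 1 + k : Nat) : Int))) k := by
        intro k
        simp only [Function.comp]
        congr 2
        push_cast
        ring
      rw [funext this]
      omega
    · have h0 : ¬ g.contains ((0 : Int), -1 - ((n + 0 : Nat) : Int)) = true := by simpa using h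
      simp only [downB, h, if_false, List.takeWhile_cons, h0]
      simp

theorem radius_eq (state : List ((Int × Int) × Int)) :
    preRadius state = half_sizeB (state_to_grid state) (state.length + 1) := by
  unfold preRadius half_sizeB
  rw [upB_eq_takeWhile (state_to_grid state) (state.length + 1) 0,
    downB_eq_takeWhile (state_to_grid state) (state.length + 1) 0]
  simp only [Nat.zero_add]

-- ---- empty-board tests agree ----

theorem all_ne12 (l : List Int) :
    (l.all (fun v => !(v == 1 || v == 2)) = true) ↔ ¬(1 ∈ l ∨ 2 ∈ l) := by
  simp [List.all_eq_true, not_or]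
  constructor
  · intro h; exact ⟨fun h1 => (h 1 h1).1 rfl, fun h2 => (h 2 h2).2 rfl⟩
  · rintro ⟨h1, h2⟩ v hv
    constructor <;> rintro rfl <;> [exact h1 hv; exact h2 hv]
-- ---- generic counting lemmas ----

theorem countP_or_disj {α : Type} (p q : α → Bool) :
    ∀ (l : List α), (∀ x ∈ l, ¬(p x = true ∧ q x = true)) →
      l.countP (fun x => p x || q x) = l.countP p + l.countP q := by
  intro l
  induction l with
  | nil => intro _; simp
  | cons a t ih =>
    intro h
    have ht := ih (fun x hx => h x (List.mem_cons_of_mem a hx))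
    have ha := h a (List.mem_cons_self)
    by_cases hp : p a = true
    · by_cases hq : q a = true
      · exact (ha ⟨hp, hq⟩).elim
      · simp [hp, hq, ht]; omega
    · by_cases hq : q a = true <;> simp [hp, hq, ht] <;> omega
theorem countP_pinned (T : (Int × Int) → Int → Bool) (c : Int × Int) :
    ∀ (l : List ((Int × Int) × Int)), (l.map (·.1)).Nodup →
      l.countP (fun p => (p.1 == c) && T p.1 p.2)
        = (if l.any (fun p => (p.1 == c) && T p.1 p.2) then 1 else 0) := by
  intro l
  induction l with
  | nil => intro _; simp
  | cons a t ih =>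
    intro h
    simp only [List.map_cons, List.nodup_cons] at h
    obtain ⟨ha, ht⟩ := h
    by_cases hp : ((a.1 == c) && T a.1 a.2) = true
    · have hc : a.1 = c := by
        have := (Bool.and_eq_true _ _).mp hp
        exact beq_iff_eq.mp this.1
      have hzero : t.countP (fun p => (p.1 == c) && T p.1 p.2) = 0 := by
        apply List.countP_eq_zero.mpr
        intro p hpmem
        have hmem : p.1 ∈ t.map (·.1) := List.mem_map_of_mem hpmem
        have : p.1 ≠ c := by intro hpc; rw [hpc, ← hc] at hmem; exact ha hmem
        simp [this]
      simp [List.countP_cons, hp, hzero]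
    · simp only [Bool.not_eq_true] at hp
      simp only [List.countP_cons, hp, ih ht, List.any_cons, Bool.false_or, cond_false]
      simp
theorem countP_keys (T : (Int × Int) → Int → Bool) :
    ∀ (cells : List (Int × Int)) (l : List ((Int × Int) × Int)), cells.Nodup → (l.map (·.1)).Nodup →
      l.countP (fun p => decide (p.1 ∈ cells) && T p.1 p.2)
        = cells.countP (fun c => l.any (fun p => (p.1 == c) && T p.1 p.2)) := by
  intro cells
  induction cells with
  | nil => intro l _ _; simp
  | cons c cs ih =>
    intro l hcells hl
    simp only [List.nodup_cons] at hcells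
    obtain ⟨hc, hcs⟩ := hcells
    have hsplit : l.countP (fun p => decide (p.1 ∈ c :: cs) && T p.1 p.2)
        = l.countP (fun p => ((p.1 == c) && T p.1 p.2) || (decide (p.1 ∈ cs) && T p.1 p.2)) := by
      apply List.countP_congr
      intro p _
      by_cases h1 : p.1 = c <;> by_cases h2 : p.1 ∈ cs <;> simp [h1, h2]
    rw [hsplit, countP_or_disj _ _ l ?_, countP_pinned T c l hl, ih l hcs hl, List.countP_cons]
    · omega
    · intro x _ hx
      obtain ⟨h1, h2⟩ := hx
      have e1 : x.1 = c := beq_iff_eq.mp ((Bool.and_eq_true _ _).mp h1).1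
      have e2 : x.1 ∈ cs := of_decide_eq_true ((Bool.and_eq_true _ _).mp h2).1
      rw [e1] at e2; exact hc e2
theorem any_key (g : PySem.Dict (Int × Int) Int) (hk : g.keys.Nodup) (c : Int × Int)
    (T : (Int × Int) → Int → Bool) :
    g.items.any (fun p => (p.1 == c) && T p.1 p.2)
      = (match g.get? c with | some v => T c v | none => false) := by
  cases hv : g.get? c with
  | none =>
    have hnk : c ∉ g.keys := (PySem.Dict.get?_eq_none_iff_not_mem_keys g c).mp hv
    simp only [List.any_eq_false]
    intro p hp
    have : p.1 ∈ g.keys := PySem.Dict.mem_keys_of_mem_items g hp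
    by_cases h : p.1 = c
    · rw [h] at this; exact absurd this hnk
    · simp [h]
  | some v =>
    have hmem : (c, v) ∈ g.items := PySem.Dict.mem_items_of_get?_eq_some g hv
    by_cases hT : T c v = true
    · show g.items.any _ = T c v
      rw [hT]
      simp only [List.any_eq_true]
      exact ⟨(c, v), hmem, by simp [hT]⟩
    · simp only [Bool.not_eq_true] at hT
      show g.items.any _ = T c v
      rw [hT]
      simp only [List.any_eq_false]
      intro p hp
      by_cases h : p.1 = c
      · have : g.get? p.1 = some p.2 := PySem.Dict.get?_of_mem_items g hp hk
        rw [h, hv] at this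
        have : p.2 = v := by injection this.symm
        simp [h, this, hT]
      · simp [h]
theorem items_count (g : PySem.Dict (Int × Int) Int) (hk : g.keys.Nodup)
    (cells : List (Int × Int)) (hc : cells.Nodup) (T : (Int × Int) → Int → Bool) :
    g.items.countP (fun p => decide (p.1 ∈ cells) && T p.1 p.2)
      = cells.countP (fun c => (match g.get? c with | some v => T c v | none => false)) := by
  have hkeys : (g.items.map (·.1)).Nodup := hk
  rw [countP_keys T cells g.items hc hkeys]
  apply List.countP_congr
  intro c _
  rw [any_key g hk c T]
theorem items_any (g : PySem.Dict (Int × Int) Int) (hk : g.keys.Nodup)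
    (cells : List (Int × Int)) (hc : cells.Nodup) (T : (Int × Int) → Int → Bool) :
    g.items.any (fun p => decide (p.1 ∈ cells) && T p.1 p.2)
      = cells.any (fun c => (match g.get? c with | some v => T c v | none => false)) := by
  rw [Bool.eq_iff_iff]
  simp only [List.any_eq_true]
  rw [← List.countP_pos_iff, ← List.countP_pos_iff, items_count g hk cells hc T]
-- ---- the neighbour-building fold of A ----

theorem foldl_foldl {α β γ : Type} (l1 : List α) (l2 : List β) (h : γ → α → β → γ) (init : γ) :
    l1.foldl (fun acc x => l2.foldl (fun a y => h a x y) acc) init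
      = (l1.flatMap (fun x => l2.map (fun y => (x, y)))).foldl (fun a p => h a p.1 p.2) init := by
  induction l1 generalizing init with
  | nil => simp
  | cons a t ih => simp [List.foldl_append, List.foldl_map, ih]
theorem foldA_char (fc : (Int × Int) → (Int × Int)) (C : (Int × Int) → Prop) [DecidablePred C] :
    ∀ (offs : List (Int × Int)) (acc : List (Int × Int)),
      (offs.map fc).Nodup → (∀ d ∈ offs, fc d ∉ acc) →
      offs.foldl (fun a d => if C d ∧ fc d ∉ a then a ++ [fc d] else a) acc
        = acc ++ (offs.filter (fun d => decide (C d))).map fc := by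
  intro offs
  induction offs with
  | nil => intro acc _ _; simp
  | cons d t ih =>
    intro acc hnd hacc
    simp only [List.map_cons, List.nodup_cons] at hnd
    obtain ⟨hd, ht⟩ := hnd
    by_cases hC : C d
    · have hnotin : fc d ∉ acc := hacc d List.mem_cons_self
      rw [List.foldl_cons, if_pos ⟨hC, hnotin⟩]
      rw [ih (acc ++ [fc d]) ht ?_]
      · simp [hC]
      · intro e he
        simp only [List.mem_append, List.mem_singleton, not_or]
        refine ⟨hacc e (List.mem_cons_of_mem d he), ?_⟩
        intro heq
        exact hd (heq ▸ List.mem_map_of_mem he)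
    · rw [List.foldl_cons, if_neg (by tauto)]
      rw [ih acc ht (fun e he => hacc e (List.mem_cons_of_mem d he))]
      simp [hC]

theorem condFull_iff_keep (g : PySem.Dict (Int × Int) Int) (mx sx sy : Int) (a b : Int)
    (hne : ¬(a = 0 ∧ b = 0)) (h1 : ((a, b) : Int × Int) ≠ (1, -1)) (h2 : ((a, b) : Int × Int) ≠ (-1, 1)) :
    condFull g mx sx sy (a, b) ↔ condKeep g mx sx sy (a, b) := by
  unfold condFull condKeep outP fcell
  constructor
  · rintro ⟨⟨hb1, hb2, _, _, _⟩, hc, hd⟩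
    exact ⟨by simp only []; omega, hc, hd⟩
  · rintro ⟨hb, hc, hd⟩
    simp only [] at hb
    refine ⟨⟨by omega, by omega, ?_, h1, h2⟩, hc, hd⟩
    intro hx
    rw [Prod.mk.injEq] at hx
    exact hne ⟨by omega, by omega⟩

theorem condFull_drop (g : PySem.Dict (Int × Int) Int) (mx sx sy : Int) :
    decide (condFull g mx sx sy (0, 0)) = false
      ∧ decide (condFull g mx sx sy (1, -1)) = false
      ∧ decide (condFull g mx sx sy (-1, 1)) = false := by
  refine ⟨?_, ?_, ?_⟩ <;> simp only [decide_eq_false_iff_not, condFull] <;>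
    rintro ⟨⟨_, _, hne, he1, he2⟩, _, _⟩
  · exact hne (by simp)
  · exact he1 rfl
  · exact he2 rfl

theorem filter9_eq (g : PySem.Dict (Int × Int) Int) (mx sx sy : Int) :
    offs9.filter (fun d => decide (condFull g mx sx sy d))
      = dirsB.filter (fun d => decide (condKeep g mx sx sy d)) := by
  obtain ⟨hd1, hd2, hd3⟩ := condFull_drop g mx sx sy
  have e : ∀ (a b : Int), ¬(a = 0 ∧ b = 0) → ((a, b) : Int × Int) ≠ (1, -1) →
      ((a, b) : Int × Int) ≠ (-1, 1) →
      decide (condFull g mx sx sy (a, b)) = decide (condKeep g mx sx sy (a, b)) := by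
    intro a b h1 h2 h3
    exact decide_eq_decide.mpr (condFull_iff_keep g mx sx sy a b h1 h2 h3)
  simp only [offs9, dirsB, List.filter_cons, List.filter_nil, hd1, hd2, hd3,
    e (-1) (-1) (by omega) (by decide) (by decide),
    e (-1) 0 (by omega) (by decide) (by decide),
    e 0 (-1) (by omega) (by decide) (by decide),
    e 0 1 (by omega) (by decide) (by decide),
    e 1 0 (by omega) (by decide) (by decide),
    e 1 1 (by omega) (by decide) (by decide), Bool.false_eq_true, if_false]

theorem fcell_inj (sx sy : Int) : Function.Injective (fcell sx sy) := by
  intro a b h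
  simp only [fcell, Prod.mk.injEq, Prod.ext_iff] at h ⊢
  omega

theorem nbrs_eq (state : List ((Int × Int) × Int)) (sx sy : Int)
    (h : ¬ outP (PySem.Int.floordiv (sizeA state) 2) (sx, sy)) :
    get_neighborsA state sx sy
      = some ((dirsB.filter (fun d =>
          decide (condKeep (state_to_grid state) (PySem.Int.floordiv (sizeA state) 2) sx sy d))).map
            (fcell sx sy)) := by
  have h' : ¬ (sx > PySem.Int.floordiv (sizeA state) 2 ∨ sx < -PySem.Int.floordiv (sizeA state) 2 ∨
      sy > PySem.Int.floordiv (sizeA state) 2 ∨ sy < -PySem.Int.floordiv (sizeA state) 2) := h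
  simp only [get_neighborsA]
  rw [if_neg h']
  rw [foldl_foldl]
  rw [show closesA.flatMap (fun x => closesA.map fun y => (x, y)) = offs9 from by decide]
  rw [PySem.List.foldl_congr_mem offs9 _
    (fun a d => if condFull (state_to_grid state) (PySem.Int.floordiv (sizeA state) 2) sx sy d
        ∧ fcell sx sy d ∉ a then a ++ [fcell sx sy d] else a) [] ?_]
  · rw [foldA_char (fcell sx sy) (condFull (state_to_grid state) (PySem.Int.floordiv (sizeA state) 2) sx sy)
      offs9 [] (List.Nodup.map (fcell_inj sx sy) (by decide)) (by simp)]
    rw [filter9_eq]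
    simp
  · intro acc p _
    obtain ⟨vx, vy⟩ := p
    simp only [condFull, fcell]
    split_ifs <;> first | rfl | tauto

-- ---- loop characterisations ----

def incCntA (g : PySem.Dict (Int × Int) Int) (player : Int) (c : Int × Int) : Int :=
  if player == 1 then (if g.getD c 0 == 2 then 1 else 0)
  else if player == 2 then (if g.getD c 0 == 1 then 1 else 0) else 0

theorem loopA_char (g : PySem.Dict (Int × Int) Int) (player : Int) :
    ∀ (l : List (Int × Int)) (v : Int),
      loopA g player l v
        = (!(l.any (fun c => g.getD c 0 == player))
            && (v + (l.map (incCntA g player)).sum == 1)) := by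
  intro l
  induction l with
  | nil => intro v; simp [loopA]
  | cons c t ih =>
    intro v
    by_cases hc : (g.getD c 0 == player) = true
    · simp [loopA, hc]
    · simp only [Bool.not_eq_true] at hc
      simp only [loopA, hc, Bool.false_eq_true, if_false, ih, List.any_cons, Bool.false_or,
        List.map_cons, List.sum_cons, incCntA]
      rw [Int.add_assoc]

abbrev qualB (mx sx sy : Int) (p : (Int × Int) × Int) : Prop :=
  p.2 ≠ -1 ∧ (p.1.1 - sx, p.1.2 - sy) ∈ dirsB ∧ ¬ outP mx p.1

theorem loopB_char (mx sx sy player : Int) (enemy : Option Int) :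
    ∀ (l : List ((Int × Int) × Int)) (n : Nat),
      loopB mx sx sy player enemy l n
        = (!(l.any (fun p => decide (qualB mx sx sy p) && (p.2 == player)))
            && ((n + l.countP (fun p =>
                  decide (qualB mx sx sy p) && !(p.2 == player) && (some p.2 == enemy))) == 1)) := by
  intro l
  induction l with
  | nil => intro n; simp [loopB]
  | cons p t ih =>
    intro n
    obtain ⟨c, v⟩ := p
    by_cases h1 : v = -1
    · have lhs : loopB mx sx sy player enemy ((c, v) :: t) n = loopB mx sx sy player enemy t n := by
        simp [loopB, h1]
      have hqd : decide (qualB mx sx sy (c, v)) = false := by simp [qualB, h1]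
      rw [lhs, ih, List.any_cons, List.countP_cons]
      simp [hqd]
    · by_cases h2 : (c.1 - sx, c.2 - sy) ∈ dirsB
      · by_cases h3 : outP mx c
        · have h3' : c.1 > mx ∨ c.1 < -mx ∨ c.2 > mx ∨ c.2 < -mx := h3
          have lhs : loopB mx sx sy player enemy ((c, v) :: t) n
              = loopB mx sx sy player enemy t n := by simp [loopB, h1, h2, h3']
          have hqd : decide (qualB mx sx sy (c, v)) = false := by simp [qualB, h3]
          rw [lhs, ih, List.any_cons, List.countP_cons]
          simp [hqd]
        · have hq : qualB mx sx sy ((c, v)) := ⟨h1, h2, h3⟩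
          have hqd : decide (qualB mx sx sy (c, v)) = true := by simp [hq]
          have h3' : ¬ (c.1 > mx ∨ c.1 < -mx ∨ c.2 > mx ∨ c.2 < -mx) := h3
          have e1 : (v == (-1 : Int)) = false := by simp [h1]
          by_cases h4 : v = player
          · have e4 : (v == player) = true := by simp [h4]
            have lhs : loopB mx sx sy player enemy ((c, v) :: t) n = false := by
              simp [loopB, e1, h2, h3', e4]
            rw [lhs, List.any_cons]
            simp [hqd, e4]
          · have e4 : (v == player) = false := by simp [h4]
            by_cases h5 : some v = enemy
            · have e5 : (some v == enemy) = true := by simp [h5]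
              have lhs : loopB mx sx sy player enemy ((c, v) :: t) n
                  = loopB mx sx sy player enemy t (n + 1) := by simp [loopB, e1, h2, h3', e4, e5]
              rw [lhs, ih, List.any_cons, List.countP_cons]
              have hcnt : (decide (qualB mx sx sy (c, v)) && !((v : Int) == player)
                  && (some v == enemy)) = true := by simp [hqd, e4, e5]
              have heq : (n + 1) + List.countP (fun p =>
                    decide (qualB mx sx sy p) && !(p.2 == player) && (some p.2 == enemy)) t
                  = n + (List.countP (fun p =>
                    decide (qualB mx sx sy p) && !(p.2 == player) && (some p.2 == enemy)) t + 1) := by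
                omega
              simp only [heq, hcnt, if_true, cond_true]
              simp [e4]
            · have e5 : (some v == enemy) = false := by simp [h5]
              have lhs : loopB mx sx sy player enemy ((c, v) :: t) n
                  = loopB mx sx sy player enemy t n := by simp [loopB, e1, h2, h3', e4, e5]
              rw [lhs, ih, List.any_cons, List.countP_cons]
              simp [hqd, e4, e5]
      · have lhs : loopB mx sx sy player enemy ((c, v) :: t) n
            = loopB mx sx sy player enemy t n := by simp [loopB, h1, h2]
        have hqd : decide (qualB mx sx sy (c, v)) = false := by simp [qualB, h2]
        rw [lhs, ih, List.any_cons, List.countP_cons]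
        simp [hqd]

-- ---- offset membership / cells ----

theorem mem_cells_iff (sx sy : Int) (c : Int × Int) :
    c ∈ dirsB.map (fcell sx sy) ↔ (c.1 - sx, c.2 - sy) ∈ dirsB := by
  simp only [dirsB, fcell, List.map_cons, List.map_nil, List.mem_cons, List.not_mem_nil, or_false,
    Prod.ext_iff, Prod.mk.injEq]
  omega

-- ---- the final assembly ----

theorem any_bridge (g : PySem.Dict (Int × Int) Int) (hk : g.keys.Nodup) (mx sx sy player : Int) :
    (((dirsB.filter (fun d => decide (condKeep g mx sx sy d))).map (fcell sx sy)).any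
        (fun c => g.getD c 0 == player))
      = (g.items.any (fun p => decide (qualB mx sx sy p) && (p.2 == player))) := by
  have hcells : (dirsB.map (fcell sx sy)).Nodup := List.Nodup.map (fcell_inj sx sy) (by decide)
  rw [List.any_map, List.any_filter]
  have hB : (g.items.any (fun p => decide (qualB mx sx sy p) && (p.2 == player)))
      = (g.items.any (fun p => decide (p.1 ∈ dirsB.map (fcell sx sy)) &&
          (fun (c : Int × Int) (v : Int) => decide (v ≠ -1 ∧ ¬ outP mx c) && (v == player)) p.1 p.2)) := by
    apply PySem.List.any_congr_mem
    intro p _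
    by_cases h1 : p.2 = -1
    · simp [qualB, h1]
    · by_cases h3 : outP mx p.1
      · simp [qualB, h1, h3]
      · simp [qualB, h1, h3, mem_cells_iff]
  rw [hB, items_any g hk (dirsB.map (fcell sx sy)) hcells
    (fun (c : Int × Int) (v : Int) => decide (v ≠ -1 ∧ ¬ outP mx c) && (v == player)), List.any_map]
  apply (PySem.List.any_congr_mem _).symm
  intro d _
  cases hv : g.get? (fcell sx sy d) with
  | none =>
    have hcon : g.contains (fcell sx sy d) = false := by
      rw [PySem.Dict.contains_eq_isSome_get?, hv]; rfl
    have hnk : ¬ condKeep g mx sx sy d := by simp [condKeep, hcon]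
    simp [Function.comp, hnk, hv]
  | some v =>
    have hcon : g.contains (fcell sx sy d) = true := by
      rw [PySem.Dict.contains_eq_isSome_get?, hv]; rfl
    have hgd : g.getD (fcell sx sy d) 0 = v := PySem.Dict.getD_of_get?_eq_some g 0 hv
    by_cases h3 : outP mx (fcell sx sy d) <;> by_cases h1 : v = -1 <;>
      simp [Function.comp, condKeep, hcon, hgd, h1, h3, hv]

theorem cnt_bridge (g : PySem.Dict (Int × Int) Int) (hk : g.keys.Nodup) (mx sx sy player : Int)
    (enemy : Option Int) (W : Int → Bool)
    (hpt : ∀ v : Int, v ≠ -1 → W v = (!(v == player) && (some v == enemy))) :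
    ((dirsB.filter (fun d => decide (condKeep g mx sx sy d))).map (fcell sx sy)).countP
        (fun c => W (g.getD c 0))
      = g.items.countP (fun p =>
          decide (qualB mx sx sy p) && !(p.2 == player) && (some p.2 == enemy)) := by
  have hcells : (dirsB.map (fcell sx sy)).Nodup := List.Nodup.map (fcell_inj sx sy) (by decide)
  rw [List.countP_map, List.countP_filter]
  have hB : g.items.countP (fun p =>
        decide (qualB mx sx sy p) && !(p.2 == player) && (some p.2 == enemy))
      = g.items.countP (fun p => decide (p.1 ∈ dirsB.map (fcell sx sy)) &&
          (fun (c : Int × Int) (v : Int) => decide (v ≠ -1 ∧ ¬ outP mx c) && W v) p.1 p.2) := by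
    apply List.countP_congr
    intro p _
    by_cases h1 : p.2 = -1
    · simp [qualB, h1]
    · by_cases h3 : outP mx p.1
      · simp [qualB, h1, h3]
      · simp [qualB, h1, h3, mem_cells_iff, hpt p.2 h1]
        exact and_assoc
  rw [hB, items_count g hk (dirsB.map (fcell sx sy)) hcells
    (fun (c : Int × Int) (v : Int) => decide (v ≠ -1 ∧ ¬ outP mx c) && W v), List.countP_map]
  apply (List.countP_congr _).symm
  intro d _
  cases hv : g.get? (fcell sx sy d) with
  | none =>
    have hcon : g.contains (fcell sx sy d) = false := by
      rw [PySem.Dict.contains_eq_isSome_get?, hv]; rfl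
    have hnk : ¬ condKeep g mx sx sy d := by simp [condKeep, hcon]
    simp [Function.comp, hnk, hv]
  | some v =>
    have hcon : g.contains (fcell sx sy d) = true := by
      rw [PySem.Dict.contains_eq_isSome_get?, hv]; rfl
    have hgd : g.getD (fcell sx sy d) 0 = v := PySem.Dict.getD_of_get?_eq_some g 0 hv
    by_cases h3 : outP mx (fcell sx sy d) <;> by_cases h1 : v = -1 <;>
      simp [Function.comp, condKeep, hcon, hgd, h1, h3, hv]

theorem main_loops (state : List ((Int × Int) × Int)) (sx sy player : Int) :
    loopA (state_to_grid state) player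
        ((dirsB.filter (fun d =>
          decide (condKeep (state_to_grid state) (PySem.Int.floordiv (sizeA state) 2) sx sy d))).map
            (fcell sx sy)) 0
      = loopB (PySem.Int.floordiv (sizeA state) 2) sx sy player
          (if player == 1 then some 2 else if player == 2 then some 1 else none)
          (state_to_grid state).items 0 := by
  have hk : (state_to_grid state).keys.Nodup := grid_keys_nodup state
  rw [loopA_char, loopB_char]
  rw [any_bridge (state_to_grid state) hk (PySem.Int.floordiv (sizeA state) 2) sx sy player]
  congr 1
  -- the enemy-count tests agree; per player case, the increment is a 0/1 indicator
  by_cases hp1 : player = 1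
  · have he : (if player == (1 : Int) then some (2 : Int) else if player == 2 then some 1 else none)
        = some 2 := by simp [hp1]
    have hinc : incCntA (state_to_grid state) player
        = fun c => if ((state_to_grid state).getD c 0 == (2 : Int)) = true then (1 : Int) else 0 := by
      funext c; simp [incCntA, hp1]
    rw [he, hinc, PySem.List.sum_map_ite_one_zero]
    rw [show (fun c => (state_to_grid state).getD c 0 == (2 : Int))
        = (fun c => (fun v => v == (2 : Int)) ((state_to_grid state).getD c 0)) from rfl]
    rw [cnt_bridge (state_to_grid state) hk (PySem.Int.floordiv (sizeA state) 2) sx sy player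
      (some 2) (fun v => v == (2 : Int)) ?_]
    · rw [Bool.eq_iff_iff]
      simp only [beq_iff_eq]
      omega
    · intro v _
      by_cases h2 : v = 2 <;> simp [h2, hp1]
  · by_cases hp2 : player = 2
    · have he : (if player == (1 : Int) then some (2 : Int) else if player == 2 then some 1 else none)
          = some 1 := by simp [hp1, hp2]
      have hinc : incCntA (state_to_grid state) player
          = fun c => if ((state_to_grid state).getD c 0 == (1 : Int)) = true then (1 : Int) else 0 := by
        funext c; simp [incCntA, hp1, hp2]
      rw [he, hinc, PySem.List.sum_map_ite_one_zero]
      rw [show (fun c => (state_to_grid state).getD c 0 == (1 : Int))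
          = (fun c => (fun v => v == (1 : Int)) ((state_to_grid state).getD c 0)) from rfl]
      rw [cnt_bridge (state_to_grid state) hk (PySem.Int.floordiv (sizeA state) 2) sx sy player
        (some 1) (fun v => v == (1 : Int)) ?_]
      · rw [Bool.eq_iff_iff]
        simp only [beq_iff_eq]
        omega
      · intro v _
        by_cases h2 : v = 1 <;> simp [h2, hp2]
    · have he : (if player == (1 : Int) then some (2 : Int) else if player == 2 then some 1 else none)
          = none := by simp [hp1, hp2]
      have hinc : incCntA (state_to_grid state) player
          = fun c => if (false : Bool) = true then (1 : Int) else 0 := by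
        funext c; simp [incCntA, hp1, hp2]
      rw [he, hinc, PySem.List.sum_map_ite_one_zero]
      rw [show (fun (_ : Int × Int) => (false : Bool))
          = (fun c => (fun (_ : Int) => (false : Bool)) ((state_to_grid state).getD c 0)) from rfl]
      rw [cnt_bridge (state_to_grid state) hk (PySem.Int.floordiv (sizeA state) 2) sx sy player
        none (fun _ => false) ?_]
      · rw [Bool.eq_iff_iff]
        simp only [beq_iff_eq]
        omega
      · intro v _
        simp

-- ===== VERDICT (by name: the statement is the Claim_ definition above) =====
theorem is_legit_spec : Claim_equal_is_legit := by
  intro state start player _hdom hpre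
  unfold Pre_is_legit at hpre
  obtain ⟨hcont, hbnd⟩ := hpre
  unfold Spec_is_legit is_legit is_legit_alt
  rw [occB_eq]
  cases hget : (state_to_grid state).get? start with
  | none =>
    rw [PySem.Dict.contains_eq_isSome_get?, hget] at hcont
    simp at hcont
  | some sv =>
    simp only [hget]
    by_cases hsv : sv = 0
    · simp only [hsv, ne_eq, not_true_eq_false, if_false]
      by_cases hv12 : (1 ∈ (state_to_grid state).values ∨ 2 ∈ (state_to_grid state).values)
      · have hgd : (state_to_grid state).getD start 0 = 0 := by
          rw [PySem.Dict.getD_of_get?_eq_some (state_to_grid state) 0 hget, hsv]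
        have hb := hbnd hgd hv12
        rw [radius_eq, ← mx_eq] at hb
        have hall : ¬ ((state_to_grid state).values.all (fun v => !(v == 1 || v == 2)) = true) :=
          fun hc => (all_ne12 _ |>.mp hc) hv12
        rw [if_neg (by tauto), if_neg hall]
        rw [← mx_eq]
        rw [if_neg (by omega)]
        rw [nbrs_eq state start.1 start.2 (by unfold outP; dsimp only; omega)]
        exact main_loops state start.1 start.2 player
      · rw [if_pos (by tauto), if_pos (all_ne12 _ |>.mpr hv12)]
    · simp [hsv]
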